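-- pv_equiv track=rewrite | github.com/thomas-wright-bioinformatics/pep_genie | app/seq_studies.py | ala_scan
-- ===== SOURCE A (Python) =====
-- def ala_scan(sequence):
--     input_list = list(sequence.upper())
--     clean_list=[]
--     for i in input_list:
--         if i != ' ':
--             clean_list.append(i)
--
--     output_list = [';Alanine Scan','\n',''.join(map(str,clean_list)),' ;Control','\n']
--     my_row = []
--     for i in range(0,len(clean_list)):
--         for j in range(0,len(clean_list)):
--             if i == j:
--                 if clean_list[j] == 'A':
--                     my_row.append('G')
--                 else:
--                     my_row.append('A')
--             else:
--                 my_row.append(clean_list[j])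
--         output_list.append(''.join(map(str, my_row)))
--         output_list.append('\n')
--         my_row = []
--     output_str = ''.join(map(str, output_list))
--     return output_str
-- ===== SOURCE B (Python) =====
-- def ala_scan(sequence):
--     clean = sequence.upper().replace(' ', '')
--     rows = [clean[:i] + ('G' if clean[i] == 'A' else 'A') + clean[i+1:]
--             for i in range(len(clean))]
--     return ';Alanine Scan\n' + clean + ' ;Control\n' + ''.join(r + '\n' for r in rows)
-- ===== Notes on version B (the rewrite author's own statement) =====
-- stated objective: simpler
-- what changed: Replaced A's nested double loop (rebuilding each variant character by character with an i==j test) by a single comprehension over positions building each variant from slices clean[:i] + sub + clean[i+1:], and the cleaning loop by replace; the per-character Python-level inner loop and per-row join disappear in favour of C-level slicing (constant-factor speedup, same O(n^2) output size).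
import Mathlib
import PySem

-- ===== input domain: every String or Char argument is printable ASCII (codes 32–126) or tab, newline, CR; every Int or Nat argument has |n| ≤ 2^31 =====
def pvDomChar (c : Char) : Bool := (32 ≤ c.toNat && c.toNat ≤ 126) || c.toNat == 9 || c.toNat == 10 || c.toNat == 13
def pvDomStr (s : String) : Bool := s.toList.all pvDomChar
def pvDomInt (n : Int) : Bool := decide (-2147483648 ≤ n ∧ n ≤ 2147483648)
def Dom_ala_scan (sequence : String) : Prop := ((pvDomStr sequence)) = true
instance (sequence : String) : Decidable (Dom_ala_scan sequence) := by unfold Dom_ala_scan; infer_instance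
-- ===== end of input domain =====

-- B replaces A's nested double loop (inner char-by-char row rebuild) by a single pass
-- building each variant with slices; objective: simpler.


-- ===== PORT A =====
-- strings are handled as List Char; ''.join(map(str, l)) is List.flatten; clean_list[j]
-- with 0 ≤ j < len is exactly List.getD
def ala_scan (sequence : String) : String :=
  let inputList := PySem.Chars.upper sequence.toList
  let cleanList := inputList.foldl (fun acc c => if c != ' ' then acc ++ [c] else acc) ([] : List Char)
  let outputList : List (List Char) :=
    [";Alanine Scan".toList, ['\n'], cleanList, " ;Control".toList, ['\n']]
  let outputList := (List.range cleanList.length).foldl (fun out i =>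
      let row := (List.range cleanList.length).foldl (fun r j =>
          if i = j then
            (if cleanList.getD j ' ' = 'A' then r ++ ['G'] else r ++ ['A'])
          else r ++ [cleanList.getD j ' ']) ([] : List Char)
      out ++ [row, ['\n']]) outputList
  String.ofList outputList.flatten

-- ===== PORT B =====
-- clean[:i] / clean[i+1:] with 0 ≤ i < len are exactly take i / drop (i+1);
-- clean[i] with i in range is List.getD
def ala_scan_alt (sequence : String) : String :=
  let clean := (PySem.Chars.upper sequence.toList).filter (fun c => c != ' ')
  let rows := (List.range clean.length).map (fun i =>
      clean.take i ++ [if clean.getD i ' ' = 'A' then 'G' else 'A'] ++ clean.drop (i+1))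
  String.ofList (";Alanine Scan\n".toList ++ clean ++ " ;Control\n".toList
      ++ rows.flatMap (fun r => r ++ ['\n']))

-- ===== PRECONDITION & SPEC =====
def Spec_ala_scan (sequence : String) (out : String) : Prop := out = ala_scan_alt sequence
instance (sequence : String) (out : String) : Decidable (Spec_ala_scan sequence out) := by unfold Spec_ala_scan; infer_instance

-- ===== CLAIM (what is proved, stated in full; the proofs are below) =====
def Claim_equal_ala_scan : Prop := ∀ (sequence : String), Dom_ala_scan sequence → Spec_ala_scan sequence (ala_scan sequence)

-- ===== LEMMAS AND PROOFS =====

theorem map_getD_range (l : List Char) (d : Char) :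
    (List.range l.length).map (fun j => l.getD j d) = l := by
  induction l with
  | nil => simp
  | cons c t ih =>
    simp only [List.length_cons, List.range_succ_eq_map, List.map_cons, List.map_map]
    simpa using ih

theorem row_eq (l : List Char) (g d : Char) :
    ∀ i, i < l.length →
      (List.range l.length).map (fun j => if i = j then g else l.getD j d)
        = l.take i ++ [g] ++ l.drop (i + 1) := by
  induction l with
  | nil => intro i h; simp at h
  | cons c t ih =>
    intro i hi
    cases i with
    | zero =>
      simp only [List.length_cons, List.range_succ_eq_map, List.map_cons, List.map_map]
      simpa using map_getD_range t d
    | succ k =>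
      simp only [List.length_cons, List.range_succ_eq_map, List.map_cons, List.map_map,
        Function.comp_def, Nat.succ_eq_add_one]
      have hk : k < t.length := by simpa using hi
      have := ih k hk
      simpa [Nat.add_right_cancel_iff] using this

theorem flatten_flatMap_pair (l : List ℕ) (f : ℕ → List Char) (c : List Char) :
    (l.flatMap (fun i => [f i, c])).flatten = l.flatMap (fun i => f i ++ c) := by
  induction l with
  | nil => rfl
  | cons x t ih => simp [ih]

-- ===== VERDICT (by name: the statement is the Claim_ definition above) =====
theorem ala_scan_spec : Claim_equal_ala_scan := by
  intro seq _
  unfold Spec_ala_scan ala_scan ala_scan_alt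
  simp only []
  set u := PySem.Chars.upper seq.toList with hu
  have hclean : u.foldl (fun acc c => if c != ' ' then acc ++ [c] else acc) ([] : List Char)
      = u.filter (fun c => c != ' ') := by
    simpa using PySem.List.foldl_append_if_eq_filter (fun c => c != ' ') (l := u) (acc := [])
  rw [hclean]
  set clean := u.filter (fun c => c != ' ') with hc
  set n := clean.length with hn
  -- inner loop is an appended map
  have hrow : ∀ i, i < n →
      ((List.range n).foldl (fun r j =>
          if i = j then
            (if clean.getD j ' ' = 'A' then r ++ ['G'] else r ++ ['A'])
          else r ++ [clean.getD j ' ']) ([] : List Char))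
        = clean.take i ++ [if clean.getD i ' ' = 'A' then 'G' else 'A'] ++ clean.drop (i + 1) := by
    intro i hi
    have h1 : ((List.range n).foldl (fun r j =>
          if i = j then
            (if clean.getD j ' ' = 'A' then r ++ ['G'] else r ++ ['A'])
          else r ++ [clean.getD j ' ']) ([] : List Char))
        = ((List.range n).foldl (fun r j =>
            r ++ [if i = j then (if clean.getD i ' ' = 'A' then 'G' else 'A')
                  else clean.getD j ' ']) ([] : List Char)) := by
      apply PySem.List.foldl_congr_mem
      intro acc j _
      by_cases h : i = j
      · subst h; split_ifs <;> simp
      · simp [h]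
    rw [h1, PySem.List.foldl_append_singleton_eq_map]
    simpa using row_eq clean (if clean.getD i ' ' = 'A' then 'G' else 'A') ' ' i hi
  -- outer loop appends per-position pairs
  rw [PySem.List.foldl_append_eq_flatMap]
  apply congrArg String.ofList
  have hfm : ((List.range n).flatMap (fun i =>
        [(List.range n).foldl (fun r j =>
          if i = j then
            (if clean.getD j ' ' = 'A' then r ++ ['G'] else r ++ ['A'])
          else r ++ [clean.getD j ' ']) ([] : List Char), ['\n']])).flatten
      = (List.range n).flatMap (fun i =>
          (clean.take i ++ [if clean.getD i ' ' = 'A' then 'G' else 'A'] ++ clean.drop (i + 1))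
          ++ ['\n']) := by
    rw [flatten_flatMap_pair]
    apply List.flatMap_congr  -- congruence over membership in range n
    intro i hi
    rw [hrow i (by simpa using hi)]
  simp only [List.flatten_append, hfm, List.flatMap_map]
  have h1 : (";Alanine Scan".toList : List Char) ++ ['\n'] = ";Alanine Scan\n".toList := by decide
  have h2 : (" ;Control".toList : List Char) ++ ['\n'] = " ;Control\n".toList := by decide
  simp only [List.flatten_cons, List.flatten_nil, List.append_nil, List.append_assoc]
  rw [← List.append_assoc (";Alanine Scan".toList), h1]
  simp [← h2]
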